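-- pv_equiv track=rewrite | github.com/memouritsen-ui/danish-procedure-generator-unified | backend/procedurewriter/pipeline/processor.py | _preserve_paragraph_breaks
-- ===== SOURCE A (Python) =====
-- def _preserve_paragraph_breaks(lines: list[str]) -> str:
--     """Preserve paragraph breaks (double newlines) in markdown content.
--
--     Args:
--         lines: List of content lines
--
--     Returns:
--         Content with paragraph breaks preserved
--     """
--     result = []
--     previous_was_heading = False
--
--     for i, line in enumerate(lines):
--         stripped = line.strip()
--
--         # Check if this is a markdown heading
--         is_heading = stripped.startswith("#")
--
--         # Add double newline before headings (except the first one)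
--         if is_heading and result:
--             # Add blank line before heading for paragraph separation
--             if result and result[-1] != "":
--                 result.append("")
--
--         result.append(line)
--         previous_was_heading = is_heading
--
--     return "\n".join(result)
-- ===== SOURCE B (Python) =====
-- def _join_segment(seg: list[str]) -> str:
--     """Join a non-empty run of lines, divide-and-conquer: split in half, join the
--     halves recursively, and pick the boundary separator from the boundary pair."""
--     if len(seg) == 1:
--         return seg[0]
--     mid = len(seg) // 2
--     left, right = seg[:mid], seg[mid:]
--     sep = "\n\n" if right[0].strip().startswith("#") and left[-1] != "" else "\n"
--     return _join_segment(left) + sep + _join_segment(right)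
--
--
-- def _preserve_paragraph_breaks(lines: list[str]) -> str:
--     return _join_segment(lines) if lines else ""
-- ===== Notes on version B (the rewrite author's own statement) =====
-- stated objective: alternative
-- what changed: Replaces A's stateful left-to-right scan that conditionally appends '' elements to a result list and joins at the end by a divide-and-conquer join: split the list in half, recursively join each half, and pick the '\n' vs '\n\n' boundary separator from the pair of lines meeting at the split.
import Mathlib
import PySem

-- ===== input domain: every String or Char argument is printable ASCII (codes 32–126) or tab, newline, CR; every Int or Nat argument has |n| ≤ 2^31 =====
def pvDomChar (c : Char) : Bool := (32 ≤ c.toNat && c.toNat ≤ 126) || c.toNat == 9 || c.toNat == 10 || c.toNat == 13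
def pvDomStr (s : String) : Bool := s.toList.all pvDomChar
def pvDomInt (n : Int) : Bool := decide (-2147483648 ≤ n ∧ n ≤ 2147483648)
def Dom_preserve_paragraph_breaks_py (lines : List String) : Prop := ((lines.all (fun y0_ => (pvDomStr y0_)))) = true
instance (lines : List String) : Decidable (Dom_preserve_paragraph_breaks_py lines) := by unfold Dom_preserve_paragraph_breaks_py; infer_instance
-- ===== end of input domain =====

-- B replaces A's stateful left-to-right list-building scan by a divide-and-conquer join:
-- split the list in half, join each half recursively, and choose the boundary separator
-- from the pair of lines meeting at the split; objective: alternative (same cost).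

-- ===== PORT A =====
-- the body of A's for-loop (one named helper; same steps, same order)
def pvStepA (result : List String) (line : String) : List String :=
  let stripped := PySem.Str.strip line
  let is_heading := PySem.Str.startswith stripped "#"
  let result :=
    if is_heading && !result.isEmpty then
      -- Python's result[-1] on this (guarded nonempty) list is its last element
      (if !result.isEmpty && result.getLast? != some "" then result ++ [""] else result)
    else result
  result ++ [line]

def preserve_paragraph_breaks_py (lines : List String) : String :=
  let result := lines.foldl pvStepA []
  PySem.Str.join "\n" result

-- ===== PORT B =====
-- B's helper _join_segment, on the List Char representation of its string result
-- (Python's str '+' is '++' of the char lists; strings are built once at the end).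
-- seg[:mid] / seg[mid:] with 0 ≤ mid ≤ len are List.take / List.drop;
-- right[0] and left[-1] are PySem.List.pyGetD (both guarded non-empty by len seg ≥ 2).
def pvSeg : List String → List Char
  | [] => []                -- unreachable: the caller guards `if lines else ""`
  | [x] => x.toList
  | x :: y :: rest =>
    let seg := x :: y :: rest
    let mid := seg.length / 2
    let left := seg.take mid
    let right := seg.drop mid
    let sep :=
      if PySem.Str.startswith (PySem.Str.strip (PySem.List.pyGetD right 0 "")) "#"
          && PySem.List.pyGetD left (-1) "" != "" then ['\n', '\n'] else ['\n']
    pvSeg left ++ sep ++ pvSeg right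
  termination_by seg => seg.length
  decreasing_by
  · simp only [List.length_take, List.length_cons]; omega
  · simp only [List.length_drop, List.length_cons]; omega

def preserve_paragraph_breaks_py_alt (lines : List String) : String :=
  if lines.isEmpty then "" else String.ofList (pvSeg lines)

-- ===== PRECONDITION & SPEC =====
def Spec_preserve_paragraph_breaks_py (lines : List String) (out : String) : Prop := out = preserve_paragraph_breaks_py_alt lines
instance (lines : List String) (out : String) : Decidable (Spec_preserve_paragraph_breaks_py lines out) := by unfold Spec_preserve_paragraph_breaks_py; infer_instance

-- ===== CLAIM (what is proved, stated in full; the proofs are below) =====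
def Claim_equal_preserve_paragraph_breaks_py : Prop := ∀ (lines : List String), Dom_preserve_paragraph_breaks_py lines → Spec_preserve_paragraph_breaks_py lines (preserve_paragraph_breaks_py lines)

-- ===== LEMMAS AND PROOFS =====

-- heading test shared by both analyses
def pvIsHead (s : String) : Bool := PySem.Str.startswith (PySem.Str.strip s) "#"

-- the tail of A's result list after the first line, as a function of the previous line
def pvTailL : List String → String → List String
  | [], _ => []
  | x :: xs, prev => (if pvIsHead x && prev != "" then [""] else []) ++ x :: pvTailL xs x

-- the joined tail (characters) both sides produce after the first line
def pvJ : List String → String → List Char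
  | [], _ => []
  | x :: xs, prev => (if pvIsHead x && prev != "" then ['\n', '\n'] else ['\n']) ++ x.toList ++ pvJ xs x

-- the characters both programs produce for a (possibly empty) run of lines
def pvVal : List String → List Char
  | [] => []
  | x :: xs => x.toList ++ pvJ xs x

theorem pv_foldA (xs : List String) : ∀ (init : List String) (prev : String),
    xs.foldl pvStepA (init ++ [prev]) = init ++ [prev] ++ pvTailL xs prev := by
  induction xs with
  | nil => intro init prev; simp [pvTailL]
  | cons x xs ih =>
    intro init prev
    simp only [List.foldl_cons]
    by_cases hh : pvIsHead x = true
    · simp [pvIsHead] at hh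
      by_cases hp : prev = ""
      · subst hp
        have hstep : pvStepA (init ++ [""]) x = (init ++ [""]) ++ [x] := by
          simp [pvStepA, hh]
        rw [hstep]
        have hrec := ih (init ++ [""]) x
        simp only [List.append_assoc] at hrec ⊢
        rw [hrec]
        have ht : pvTailL (x :: xs) "" = (if pvIsHead x && ("" : String) != "" then [""] else []) ++ x :: pvTailL xs x := rfl
        rw [ht]
        simp
      · have hstep : pvStepA (init ++ [prev]) x = ((init ++ [prev]) ++ [""]) ++ [x] := by
          simp [pvStepA, hh, hp]
        rw [hstep]
        have hrec := ih ((init ++ [prev]) ++ [""]) x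
        simp only [List.append_assoc] at hrec ⊢
        rw [hrec]
        have ht : pvTailL (x :: xs) prev = (if pvIsHead x && prev != "" then [""] else []) ++ x :: pvTailL xs x := rfl
        rw [ht]
        simp [pvIsHead, hh, hp]
    · simp [pvIsHead] at hh
      have hstep : pvStepA (init ++ [prev]) x = (init ++ [prev]) ++ [x] := by
        simp [pvStepA, hh]
      rw [hstep]
      have hrec := ih (init ++ [prev]) x
      simp only [List.append_assoc] at hrec ⊢
      rw [hrec]
      have ht : pvTailL (x :: xs) prev = (if pvIsHead x && prev != "" then [""] else []) ++ x :: pvTailL xs x := rfl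
      rw [ht]
      simp [pvIsHead, hh]

theorem pv_foldA0 (l0 : String) (rest : List String) :
    List.foldl pvStepA [] (l0 :: rest) = [l0] ++ pvTailL rest l0 := by
  rw [List.foldl_cons]
  have h0 : pvStepA [] l0 = [] ++ [l0] := by simp [pvStepA]
  rw [h0, pv_foldA rest [] l0]
  simp

-- joining A's tail with "\n" yields pvJ
theorem pv_joinA (xs : List String) : ∀ (prev : String) (l : List Char),
    PySem.Chars.join ['\n'] (l :: (pvTailL xs prev).map String.toList) = l ++ pvJ xs prev := by
  induction xs with
  | nil => intro prev l; simp [pvTailL, pvJ, PySem.Chars.join_singleton]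
  | cons x xs ih =>
    intro prev l
    have ht : pvTailL (x :: xs) prev = (if pvIsHead x && prev != "" then [""] else []) ++ x :: pvTailL xs x := rfl
    have hj : pvJ (x :: xs) prev = (if pvIsHead x && prev != "" then ['\n', '\n'] else ['\n']) ++ x.toList ++ pvJ xs x := rfl
    cases hcb : (pvIsHead x && prev != "") with
    | true =>
      have ht' : pvTailL (x :: xs) prev = "" :: x :: pvTailL xs x := by rw [ht, hcb]; simp
      have hj' : pvJ (x :: xs) prev = '\n' :: '\n' :: (x.toList ++ pvJ xs x) := by rw [hj, hcb]; simp
      rw [ht', hj', List.map_cons, List.map_cons, PySem.Chars.join_cons_cons,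
        PySem.Chars.join_cons_cons, ih x x.toList]
      simp
    | false =>
      have ht' : pvTailL (x :: xs) prev = x :: pvTailL xs x := by rw [ht, hcb]; simp
      have hj' : pvJ (x :: xs) prev = '\n' :: (x.toList ++ pvJ xs x) := by rw [hj, hcb]; simp
      rw [ht', hj', List.map_cons, PySem.Chars.join_cons_cons, ih x x.toList]
      simp

-- pvJ of a concatenation splits at the boundary, the previous line being the left run's last
theorem pv_J_append (xs : List String) : ∀ (ys : List String) (prev : String),
    pvJ (xs ++ ys) prev = pvJ xs prev ++ pvJ ys (xs.getLastD prev) := by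
  induction xs with
  | nil => intro ys prev; simp [pvJ]
  | cons x xs ih =>
    intro ys prev
    have hj : ∀ t p, pvJ (x :: t) p
        = (if pvIsHead x && p != "" then ['\n', '\n'] else ['\n']) ++ x.toList ++ pvJ t x := fun _ _ => rfl
    rw [List.cons_append, hj, hj, ih ys x, List.getLastD_cons]
    simp

-- pvVal of a concatenation of two non-empty runs: the boundary separator is local
theorem pv_val_append (l r : List String) (hl : l ≠ []) (hr : r ≠ []) :
    pvVal (l ++ r)
      = pvVal l
        ++ (if pvIsHead (PySem.List.pyGetD r 0 "") && PySem.List.pyGetD l (-1) "" != ""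
            then ['\n', '\n'] else ['\n'])
        ++ pvVal r := by
  obtain ⟨x, xs, rfl⟩ := List.exists_cons_of_ne_nil hl
  obtain ⟨r0, rs, rfl⟩ := List.exists_cons_of_ne_nil hr
  have h0 : PySem.List.pyGetD (r0 :: rs) 0 "" = r0 := PySem.List.pyGetD_zero_cons r0 rs ""
  have h1 : PySem.List.pyGetD (x :: xs) (-1) "" = (x :: xs).getLastD "" := by
    simp [pysem, List.getLastD_eq_getLast?, List.getLast?_eq_getElem?]
    exact rfl
  have hval : ∀ t p, pvVal (p :: t) = p.toList ++ pvJ t p := fun _ _ => rfl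
  rw [List.cons_append, hval, hval, pv_J_append xs (r0 :: rs) x, h0, h1]
  have hlast : (x :: xs).getLastD "" = xs.getLastD x := by
    simp [List.getLastD_eq_getLast?, List.getLast?_cons]
  rw [hlast]
  have hj : pvJ (r0 :: rs) (xs.getLastD x)
      = (if pvIsHead r0 && (xs.getLastD x) != "" then ['\n', '\n'] else ['\n']) ++ r0.toList ++ pvJ rs r0 := rfl
  rw [hj, hval]
  simp

-- B's divide-and-conquer computes pvVal on every non-empty segment
theorem pv_seg_val (n : Nat) : ∀ (seg : List String), seg.length ≤ n → pvSeg seg = pvVal seg := by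
  induction n with
  | zero =>
    intro seg h
    have hs : seg = [] := List.eq_nil_of_length_eq_zero (Nat.le_zero.mp h)
    subst hs
    simp [pvSeg, pvVal]
  | succ n ih =>
    intro seg hlen
    match seg with
    | [] => simp [pvSeg, pvVal]
    | [x] => simp [pvSeg, pvVal, pvJ]
    | x :: y :: rest =>
      rw [pvSeg]
      have hlen2 : 2 ≤ (x :: y :: rest).length := by simp
      have hmid1 : 1 ≤ (x :: y :: rest).length / 2 := by omega
      have hmidlt : (x :: y :: rest).length / 2 < (x :: y :: rest).length := by omega
      have hltake : ((x :: y :: rest).take ((x :: y :: rest).length / 2)).length ≤ n := by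
        simp only [List.length_take]
        have := hlen
        simp at this ⊢
        omega
      have hldrop : ((x :: y :: rest).drop ((x :: y :: rest).length / 2)).length ≤ n := by
        simp only [List.length_drop]
        have := hlen
        simp at this ⊢
        omega
      rw [ih _ hltake, ih _ hldrop]
      have htne : (x :: y :: rest).take ((x :: y :: rest).length / 2) ≠ [] := by
        intro h
        have := congrArg List.length h
        simp only [List.length_take, List.length_nil] at this
        omega
      have hdne : (x :: y :: rest).drop ((x :: y :: rest).length / 2) ≠ [] := by
        intro h
        have := congrArg List.length h
        simp only [List.length_drop, List.length_nil] at this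
        omega
      have hIH : ∀ s : String, PySem.Str.startswith (PySem.Str.strip s) "#" = pvIsHead s :=
        fun _ => rfl
      rw [hIH, ← pv_val_append _ _ htne hdne, List.take_append_drop]

-- ===== VERDICT (by name: the statement is the Claim_ definition above) =====
theorem preserve_paragraph_breaks_py_spec : Claim_equal_preserve_paragraph_breaks_py := by
  intro lines _
  unfold Spec_preserve_paragraph_breaks_py preserve_paragraph_breaks_py preserve_paragraph_breaks_py_alt
  cases lines with
  | nil => rfl
  | cons l0 rest =>
    rw [List.isEmpty_cons]
    simp only [Bool.false_eq_true, if_false]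
    show PySem.Str.join "\n" (List.foldl pvStepA [] (l0 :: rest))
        = String.ofList (pvSeg (l0 :: rest))
    rw [pv_foldA0, pv_seg_val (l0 :: rest).length (l0 :: rest) le_rfl]
    simp only [PySem.Str.join]
    apply congrArg String.ofList
    rw [show ("\n" : String).toList = ['\n'] from by decide]
    rw [show List.map String.toList ([l0] ++ pvTailL rest l0)
        = l0.toList :: (pvTailL rest l0).map String.toList from by simp]
    rw [pv_joinA rest l0 l0.toList]
    rfl
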